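-- pv_equiv track=rewrite | github.com/j5jun/Kernelized-Perceptron | kernel_q2.py | Kperceptron
-- ===== SOURCE A (Python) =====
-- def M(s: str, t: str, p: int) -> int:
--     observed = []
--     for i in range(len(s)-p+1):
--         substring = s[i:i+p]
--         if substring in t:
--             if substring not in observed:
--                 observed.append(substring)
--     return len(observed)
--
-- def Kperceptron(trainx, trainy, num):
--     I = []
--     for t in range(0, len(trainx)):
--         dotproduct = 0
--         for i in I:
--             dotproduct += int(trainy[i])*M(trainx[i], trainx[t], num)
--         if int(trainy[t])*dotproduct <= 0:
--             I.append(t)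
--     return I
-- ===== SOURCE B (Python) =====
-- def Kperceptron(trainx, trainy, num):
--     n = len(trainx)
--     # Phase 1: precompute each string's set of distinct length-num windows.
--     W = [set(s[i:i+num] for i in range(len(s) - num + 1)) for s in trainx]
--     # Phase 2: perceptron pass maintaining a running score vector:
--     # scores[j] == sum over i in I of y_i * M(x_i, x_j) for every not-yet-visited j.
--     # Entries at or below t are never read again, so only the suffix is updated.
--     scores = [0] * n
--     I = []
--     for t in range(n):
--         yt = int(trainy[t])
--         if yt * scores[t] <= 0:
--             I.append(t)
--             Wt = W[t]
--             scores[t+1:] = [sc + yt * sum(1 for w in Wt if w in x)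
--                             for sc, x in zip(scores[t+1:], trainx[t+1:])]
--     return I
-- ===== Notes on version B (the rewrite author's own statement) =====
-- stated objective: alternative
-- what changed: B precomputes every training string's set of distinct length-num windows up front and replaces A's inner scan over the mistake set I by a running score vector: on each mistake t it adds the kernel row y_t*K[t][.] to the still-unvisited suffix scores[t+1:], maintaining scores[j] = sum_{i in I} y_i*M(x_i,x_j), so no kernel value is recomputed inside the online scan.
import Mathlib
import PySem

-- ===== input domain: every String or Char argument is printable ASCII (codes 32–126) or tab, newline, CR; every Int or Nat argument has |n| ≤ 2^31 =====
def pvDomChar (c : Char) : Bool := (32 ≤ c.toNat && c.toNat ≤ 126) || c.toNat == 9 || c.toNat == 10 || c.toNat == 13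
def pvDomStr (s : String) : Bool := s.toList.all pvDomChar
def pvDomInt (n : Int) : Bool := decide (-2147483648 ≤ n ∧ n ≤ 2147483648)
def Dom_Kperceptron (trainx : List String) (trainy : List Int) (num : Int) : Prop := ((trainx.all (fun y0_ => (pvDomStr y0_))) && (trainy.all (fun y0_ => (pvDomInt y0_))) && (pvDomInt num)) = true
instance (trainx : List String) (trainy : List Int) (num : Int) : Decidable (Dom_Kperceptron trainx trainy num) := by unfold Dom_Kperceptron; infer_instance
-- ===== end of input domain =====

-- B precomputes each string's window set and maintains a running score vector, adding a kernel
-- row to the still-unvisited suffix per mistake, instead of A's inner scan with inline kernel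
-- calls — proved to return the same index list.

-- ===== PORT A =====
-- M(s, t, p): count of distinct length-p slices of s occurring in t (append-if-absent list).
def Ma (s t : String) (p : Int) : Int :=
  ((PySem.List.pyRange 0 (PySem.Str.len s - p + 1) 1).foldl
    (fun observed i =>
      let substring := PySem.Str.slice s (some i) (some (i + p))
      if PySem.Str.isIn substring t then
        (if observed.contains substring = false then observed ++ [substring] else observed)
      else observed)
    ([] : List String)).length

-- body of A's 'for t in range(0, len(trainx))' loop
def stepA (trainx : List String) (trainy : List Int) (num : Int) (I : List Int) (t : Int) : List Int :=
  let dotproduct := I.foldl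
    (fun acc i => acc + PySem.List.pyGetD trainy i 0 *
      Ma (PySem.List.pyGetD trainx i "") (PySem.List.pyGetD trainx t "") num) 0
  if PySem.List.pyGetD trainy t 0 * dotproduct ≤ 0 then I ++ [t] else I

def Kperceptron (trainx : List String) (trainy : List Int) (num : Int) : List Int :=
  (PySem.List.pyRange 0 (trainx.length : Int) 1).foldl (stepA trainx trainy num) []

-- ===== PORT B =====
-- the set of distinct length-p windows of s (B's Phase-1 per-string precomputation)
def winSet (s : String) (p : Int) : PySem.Set String :=
  PySem.Set.ofList ((PySem.List.pyRange 0 (PySem.Str.len s - p + 1) 1).map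
    (fun i => PySem.Str.slice s (some i) (some (i + p))))

-- body of B's Phase-2 loop: state (scores, I); on a mistake, append t and add the kernel
-- row y_t*K[t][.] to the suffix scores[t+1:] (earlier entries are never read again).
def stepB (trainx : List String) (trainy : List Int) (W : List (PySem.Set String))
    (st : List Int × List Int) (t : Int) : List Int × List Int :=
  let yt := PySem.List.pyGetD trainy t 0
  if yt * PySem.List.pyGetD st.1 t 0 ≤ 0 then
    let Wt := PySem.List.pyGetD W t PySem.Set.empty
    (PySem.List.slice st.1 none (some (t+1)) ++
       ((PySem.List.slice st.1 (some (t+1)) none).zip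
          (PySem.List.slice trainx (some (t+1)) none)).map
         (fun p => p.1 + yt * (Wt.countP (fun w => PySem.Str.isIn w p.2) : Int)),
     st.2 ++ [t])
  else st

def Kperceptron_alt (trainx : List String) (trainy : List Int) (num : Int) : List Int :=
  let W := trainx.map (fun s => winSet s num)
  ((PySem.List.pyRange 0 (trainx.length : Int) 1).foldl
    (stepB trainx trainy W) (List.replicate trainx.length 0, [])).2

-- ===== PRECONDITION & SPEC =====
-- Pre_ excludes exactly the inputs where A raises IndexError: trainy shorter than trainx
-- (trainy[t] is read for every t below len(trainx)).
def Pre_Kperceptron (trainx : List String) (trainy : List Int) (_num : Int) : Prop :=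
  trainx.length ≤ trainy.length
instance (trainx : List String) (trainy : List Int) (num : Int) : Decidable (Pre_Kperceptron trainx trainy num) := by unfold Pre_Kperceptron; infer_instance
def pvWitness_Kperceptron : List String × List Int × Int := (["ab", "ba", "aa"], [1, -1, 1], 1)

def Spec_Kperceptron (trainx : List String) (trainy : List Int) (num : Int) (out : List Int) : Prop := out = Kperceptron_alt trainx trainy num
instance (trainx : List String) (trainy : List Int) (num : Int) (out : List Int) : Decidable (Spec_Kperceptron trainx trainy num out) := by unfold Spec_Kperceptron; infer_instance

-- ===== CLAIM (what is proved, stated in full; the proofs are below) =====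
def Claim_equal_Kperceptron : Prop := ∀ (trainx : List String) (trainy : List Int) (num : Int), Dom_Kperceptron trainx trainy num → Pre_Kperceptron trainx trainy num → Spec_Kperceptron trainx trainy num (Kperceptron trainx trainy num)

-- ===== LEMMAS AND PROOFS =====

-- first-occurrence dedup and filter commute up to permutation, so the lengths agree
theorem len_ofList_filter {α : Type} [BEq α] [LawfulBEq α] (p : α → Bool) (xs : List α) :
    (PySem.Set.ofList (xs.filter p)).length = ((PySem.Set.ofList xs).filter p).length := by
  apply List.Perm.length_eq
  apply (List.perm_ext_iff_of_nodup (PySem.Set.nodup_ofList _)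
    ((PySem.Set.nodup_ofList _).filter _)).mpr
  intro a
  simp [PySem.Set.mem_ofList, List.mem_filter]

-- B's kernel value, read off the precomputed window set
def kcount (s x : String) (p : Int) : Int :=
  ((winSet s p).countP (fun w => PySem.Str.isIn w x) : Int)

-- A's append-if-absent loop over matching windows builds exactly the set of matching
-- windows, whose size B reads off the deduplicated window set
theorem Ma_eq_kcount (s t : String) (p : Int) : Ma s t p = kcount s t p := by
  unfold Ma kcount winSet
  have h0 : (fun (observed : List String) (i : Int) =>
      let substring := PySem.Str.slice s (some i) (some (i + p))
      if PySem.Str.isIn substring t then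
        (if observed.contains substring = false then observed ++ [substring] else observed)
      else observed)
      = (fun (observed : List String) (i : Int) =>
        if PySem.Str.isIn (PySem.Str.slice s (some i) (some (i + p))) t then
          PySem.Set.add observed (PySem.Str.slice s (some i) (some (i + p))) else observed) := by
    funext obs i
    simp [PySem.Set.add, PySem.Set.contains]
  rw [h0, ← List.foldl_map (f := fun i => PySem.Str.slice s (some i) (some (i + p)))
      (g := fun (observed : List String) w =>
        if PySem.Str.isIn w t then PySem.Set.add observed w else observed),
    PySem.List.foldl_if_eq_foldl_filter, ← PySem.Set.ofList_eq_foldl]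
  rw [List.countP_eq_length_filter, len_ofList_filter]

-- the dot product over the mistake set that B's score vector caches per training point
def dotI (trainx : List String) (trainy : List Int) (num : Int) (I : List Int) (xj : String) : Int :=
  (I.map (fun i => PySem.List.pyGetD trainy i 0 * kcount (PySem.List.pyGetD trainx i "") xj num)).sum

theorem getD_map_lt {α β : Type} (f : α → β) (xs : List α) (n : Nat) (h : n < xs.length)
    (d : α) (d' : β) : (xs.map f).getD n d' = f (xs.getD n d) := by
  rw [List.getD_eq_getElem _ _ (by simpa using h), List.getD_eq_getElem _ _ h, List.getElem_map]

theorem dotI_append (trainx : List String) (trainy : List Int) (num : Int) (I : List Int)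
    (k : Int) (xj : String) :
    dotI trainx trainy num (I ++ [k]) xj
      = dotI trainx trainy num I xj
        + PySem.List.pyGetD trainy k 0 * kcount (PySem.List.pyGetD trainx k "") xj num := by
  simp [dotI]

-- reading B's suffix-updated score vector at a not-yet-visited index
theorem getD_suffix_update (scores : List Int) (trainx : List String) (k j : Nat)
    (f : Int → String → Int) (hlen : scores.length = trainx.length)
    (hj1 : k + 1 ≤ j) (hj : j < trainx.length) :
    (scores.take (k+1) ++
      ((scores.drop (k+1)).zip (trainx.drop (k+1))).map (fun p => f p.1 p.2)).getD j 0
      = f (scores.getD j 0) (trainx.getD j "") := by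
  have hkl : (scores.take (k+1)).length = k+1 := by
    rw [List.length_take]; omega
  rw [List.getD_append_right _ _ _ _ (by omega), hkl]
  have hlt : j - (k+1) < (((scores.drop (k+1)).zip (trainx.drop (k+1))).map
      (fun p => f p.1 p.2)).length := by
    simp [List.length_zip, hlen]; omega
  rw [List.getD_eq_getElem _ _ hlt, List.getElem_map, List.getElem_zip]
  rw [List.getD_eq_getElem _ _ (by omega : j < scores.length),
    List.getD_eq_getElem _ _ hj]
  have hidx : k + 1 + (j - (k+1)) = j := by omega
  simp only [List.getElem_drop, hidx]

-- main invariant: B's score vector caches dotI of the current mistake set on the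
-- still-unvisited suffix; fuel-based induction peels the range via pyRange_one_cons
theorem loop_eq (trainx : List String) (trainy : List Int) (num : Int) :
    ∀ (fuel k : Nat) (I scores : List Int),
      trainx.length - k ≤ fuel →
      scores.length = trainx.length →
      (∀ j : Nat, k ≤ j → j < trainx.length →
        scores.getD j 0 = dotI trainx trainy num I (trainx.getD j "")) →
      (PySem.List.pyRange (k : Int) (trainx.length : Int) 1).foldl (stepA trainx trainy num) I
        = ((PySem.List.pyRange (k : Int) (trainx.length : Int) 1).foldl
            (stepB trainx trainy (trainx.map (fun s => winSet s num))) (scores, I)).2 := by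
  intro fuel
  induction fuel with
  | zero =>
    intro k I scores hfuel _ _
    rw [PySem.List.pyRange_one_eq_nil (by exact_mod_cast Nat.le_of_sub_eq_zero (by omega))]
    rfl
  | succ fuel ih =>
    intro k I scores hfuel hlen hval
    by_cases hk : k < trainx.length
    · rw [PySem.List.pyRange_one_cons (by exact_mod_cast hk)]
      simp only [List.foldl_cons]
      have hxk : PySem.List.pyGetD trainx (k : Int) "" = trainx.getD k "" := by
        rw [PySem.List.pyGetD_natCast]
      have hW : PySem.List.pyGetD (trainx.map (fun s => winSet s num)) (k : Int) PySem.Set.empty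
          = winSet (PySem.List.pyGetD trainx (k : Int) "") num := by
        rw [PySem.List.pyGetD_natCast, getD_map_lt _ _ _ hk "", hxk]
      have hsc : PySem.List.pyGetD scores (k : Int) 0
          = dotI trainx trainy num I (PySem.List.pyGetD trainx (k : Int) "") := by
        rw [PySem.List.pyGetD_natCast, hval k le_rfl hk, hxk]
      have hdot : I.foldl
          (fun acc i => acc + PySem.List.pyGetD trainy i 0 *
            Ma (PySem.List.pyGetD trainx i "") (PySem.List.pyGetD trainx (k : Int) "") num) 0
          = dotI trainx trainy num I (PySem.List.pyGetD trainx (k : Int) "") := by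
        rw [PySem.List.foldl_add, zero_add]
        unfold dotI
        congr 1
        exact List.map_congr_left (fun i _ => by rw [Ma_eq_kcount])
      have hcast : (k : Int) + 1 = ((k + 1 : Nat) : Int) := by push_cast; ring
      by_cases hcond : PySem.List.pyGetD trainy (k : Int) 0
          * dotI trainx trainy num I (PySem.List.pyGetD trainx (k : Int) "") ≤ 0
      · have hA : stepA trainx trainy num I (k : Int) = I ++ [(k : Int)] := by
          unfold stepA; dsimp only; rw [hdot, if_pos hcond]
        have hB : stepB trainx trainy (trainx.map (fun s => winSet s num)) (scores, I) (k : Int)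
            = (scores.take (k+1) ++
                ((scores.drop (k+1)).zip (trainx.drop (k+1))).map
                  (fun p => p.1 + PySem.List.pyGetD trainy (k : Int) 0
                    * kcount (PySem.List.pyGetD trainx (k : Int) "") p.2 num),
               I ++ [(k : Int)]) := by
          unfold stepB; dsimp only
          rw [hsc, if_pos hcond, hW, hcast, PySem.List.slice_to_natCast,
            PySem.List.slice_from_natCast, PySem.List.slice_from_natCast]
          rfl
        rw [hA, hB]
        apply ih (k + 1) _ _ (by omega)
        · simp only [List.length_append, List.length_take, List.length_map,
            List.length_zip, List.length_drop, hlen]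
          omega
        · intro j hj1 hj
          rw [getD_suffix_update scores trainx k j
              (fun sc x => sc + PySem.List.pyGetD trainy (k : Int) 0
                * kcount (PySem.List.pyGetD trainx (k : Int) "") x num) hlen hj1 hj,
            hval j (by omega) hj, dotI_append]
      · have hA : stepA trainx trainy num I (k : Int) = I := by
          unfold stepA; dsimp only; rw [hdot, if_neg hcond]
        have hB : stepB trainx trainy (trainx.map (fun s => winSet s num)) (scores, I) (k : Int)
            = (scores, I) := by
          unfold stepB; dsimp only; rw [hsc, if_neg hcond]
        rw [hA, hB, hcast]
        exact ih (k + 1) I scores (by omega) hlen (fun j hj1 hj => hval j (by omega) hj)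
    · rw [PySem.List.pyRange_one_eq_nil (by exact_mod_cast (by omega : trainx.length ≤ k))]
      rfl

-- ===== VERDICT (by name: the statement is the Claim_ definition above) =====
theorem Kperceptron_spec : Claim_equal_Kperceptron := by
  intro trainx trainy num _ _
  unfold Spec_Kperceptron Kperceptron Kperceptron_alt
  have h0 : ((0 : Nat) : Int) = (0 : Int) := rfl
  refine h0 ▸ loop_eq trainx trainy num trainx.length 0 [] _ (by omega)
    (List.length_replicate ..) ?_
  intro j _ hj
  rw [List.getD_eq_getElem _ _ (by simpa using hj), List.getElem_replicate]
  rfl
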